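-- pv_equiv track=rewrite | github.com/TOLAAJAO/cmpsc-132 | Spring 2026 work/notes/QUIZ ONE REVIEW.py | right_max
-- ===== SOURCE A (Python) =====
-- def right_max(num):
--     if num < 10:
--         return num
--     right = right_max(num // 10)
--     max_right_digit = right % 10
--     current_digit = num % 10
--     new_digit = max(current_digit, max_right_digit)
--     return right * 10 + new_digit
-- ===== SOURCE B (Python) =====
-- def right_max(num):
--     if num < 10:
--         return num
--     digits = []
--     n = num
--     while n:
--         digits.append(n % 10)
--         n //= 10
--     digits.reverse()
--     result = 0
--     m = 0
--     for d in digits: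
--         m = max(m, d)
--         result = result * 10 + m
--     return result
-- ===== Notes on version B (the rewrite author's own statement) =====
-- stated objective: alternative
-- what changed: Replaces A's recursion (which re-reads the running max from the last digit of the partial result via %10) with an explicit iterative digit extraction, a reverse, and one left-to-right sweep maintaining the running max in its own variable.
import Mathlib
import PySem

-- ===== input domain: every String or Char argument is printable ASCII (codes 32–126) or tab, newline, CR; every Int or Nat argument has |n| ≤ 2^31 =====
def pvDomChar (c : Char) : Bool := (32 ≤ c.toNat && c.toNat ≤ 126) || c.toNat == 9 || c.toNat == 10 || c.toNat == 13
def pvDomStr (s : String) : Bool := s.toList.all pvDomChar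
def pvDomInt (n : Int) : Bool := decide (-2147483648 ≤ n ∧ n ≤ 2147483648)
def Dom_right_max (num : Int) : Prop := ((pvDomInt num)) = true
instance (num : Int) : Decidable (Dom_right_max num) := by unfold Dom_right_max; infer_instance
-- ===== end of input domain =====

-- B replaces A's recursion (running max read off the last digit of the partial result) by
-- iterative digit extraction + one left-to-right sweep with an explicit running max; same cost.

-- ===== PORT A =====
def right_max (num : Int) : Int :=
  if num < 10 then num
  else
    let right := right_max (PySem.Int.floordiv num 10)
    let max_right_digit := PySem.Int.mod right 10
    let current_digit := PySem.Int.mod num 10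
    let new_digit := max current_digit max_right_digit
    right * 10 + new_digit
termination_by num.toNat
decreasing_by
  rw [PySem.Int.floordiv_eq_ediv_of_pos (by omega : (0:Int) < 10)]
  omega

-- ===== PORT B =====
-- `while n: digits.append(n % 10); n //= 10` — the loop is only entered with n = num ≥ 10,
-- where the guard `while n` coincides with 0 < n (ported so for termination).
def pvDigitsLE (n : Int) : List Int :=
  if 0 < n then PySem.Int.mod n 10 :: pvDigitsLE (PySem.Int.floordiv n 10) else []
termination_by n.toNat
decreasing_by
  rw [PySem.Int.floordiv_eq_ediv_of_pos (by omega : (0:Int) < 10)]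
  omega

-- one step of the for-loop: m = max(m, d); result = result * 10 + m
def pvStep (s : Int × Int) (d : Int) : Int × Int := (s.1 * 10 + max s.2 d, max s.2 d)

def right_max_alt (num : Int) : Int :=
  if num < 10 then num
  else ((pvDigitsLE num).reverse.foldl pvStep ((0 : Int), (0 : Int))).1

-- ===== PRECONDITION & SPEC =====
def Spec_right_max (num : Int) (out : Int) : Prop := out = right_max_alt num
instance (num : Int) (out : Int) : Decidable (Spec_right_max num out) := by unfold Spec_right_max; infer_instance

-- ===== CLAIM (what is proved, stated in full; the proofs are below) =====
def Claim_equal_right_max : Prop := ∀ (num : Int), Dom_right_max num → Spec_right_max num (right_max num)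

-- ===== LEMMAS AND PROOFS =====

theorem right_max_lt (num : Int) (h : num < 10) : right_max num = num := by
  rw [right_max]; simp [h]

theorem right_max_ge (num : Int) (h : ¬ num < 10) :
    right_max num =
      right_max (PySem.Int.floordiv num 10) * 10 +
        max (PySem.Int.mod num 10) (PySem.Int.mod (right_max (PySem.Int.floordiv num 10)) 10) := by
  rw [right_max]; simp [h]

theorem pvDigitsLE_pos (n : Int) (h : 0 < n) :
    pvDigitsLE n = PySem.Int.mod n 10 :: pvDigitsLE (PySem.Int.floordiv n 10) := by
  rw [pvDigitsLE]; simp [h]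

-- the fold over the big-endian digit list computes A's value, and the running max is its last digit
theorem pv_key : ∀ (k : Nat) (n : Int), 1 ≤ n → n.toNat ≤ k →
    (pvDigitsLE n).reverse.foldl pvStep ((0 : Int), (0 : Int)) =
      (right_max n, PySem.Int.mod (right_max n) 10) := by
  intro k
  induction k with
  | zero => intro n h1 h2; omega
  | succ k ih =>
    intro n h1 h2
    rw [pvDigitsLE_pos n (by omega)]
    by_cases h10 : n < 10
    · have hq : PySem.Int.floordiv n 10 = 0 := by
        rw [PySem.Int.floordiv_eq_ediv_of_pos (by omega : (0:Int) < 10)]; omega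
      have hm : PySem.Int.mod n 10 = n := by
        rw [PySem.Int.mod_eq_emod_of_pos (by omega : (0:Int) < 10)]; omega
      rw [hq, hm, right_max_lt n h10, hm]
      rw [pvDigitsLE]
      simp [pvStep]
      omega
    · have hq1 : 1 ≤ PySem.Int.floordiv n 10 := by
        rw [PySem.Int.floordiv_eq_ediv_of_pos (by omega : (0:Int) < 10)]; omega
      have hqk : (PySem.Int.floordiv n 10).toNat ≤ k := by
        rw [PySem.Int.floordiv_eq_ediv_of_pos (by omega : (0:Int) < 10)]; omega
      rw [List.reverse_cons, List.foldl_append, ih _ hq1 hqk, right_max_ge n h10]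
      have hmr : 0 ≤ PySem.Int.mod (right_max (PySem.Int.floordiv n 10)) 10 ∧
          PySem.Int.mod (right_max (PySem.Int.floordiv n 10)) 10 < 10 := by
        rw [PySem.Int.mod_eq_emod_of_pos (by omega : (0:Int) < 10)]; omega
      have hmn : 0 ≤ PySem.Int.mod n 10 ∧ PySem.Int.mod n 10 < 10 := by
        rw [PySem.Int.mod_eq_emod_of_pos (by omega : (0:Int) < 10)]; omega
      simp only [List.foldl_cons, List.foldl_nil, pvStep]
      rw [Prod.mk.injEq]
      constructor
      · rw [max_comm]
      · simp only [PySem.Int.mod_eq_emod_of_pos (by omega : (0:Int) < 10)] at hmr hmn ⊢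
        rw [max_comm]
        omega

-- ===== VERDICT (by name: the statement is the Claim_ definition above) =====
theorem right_max_spec : Claim_equal_right_max := by
  intro num _
  unfold Spec_right_max right_max_alt
  by_cases h : num < 10
  · rw [right_max_lt num h]; simp [h]
  · rw [if_neg h, pv_key num.toNat num (by omega) (le_refl _)]
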